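-- pv_equiv track=rewrite | github.com/fqf2009/LeetCode | leetcode/lc2312_SellingPiecesOfWood.py | sellingWood
-- ===== SOURCE A (Python) =====
-- from collections import defaultdict
-- from functools import cache
-- from typing import List
--
-- def sellingWood(m: int, n: int, prices: List[List[int]]) -> int:
--     value = [[0] * (n + 1) for _ in range(m + 1)]
--     price2 = defaultdict(dict)
--     for x, y, p in prices:
--         price2[x][y] = p
--     for i in range(m + 1):
--         for j in range(n + 1):
--             a = i
--             while a > 0 and a not in price2:
--                 a -= 1
--             if a == 0:
--                 continue
--             b = j
--             while b > 0 and b not in price2[a]: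
--                 b -= 1
--             if b == 0:
--                 continue
--             value[a][b] = price2[a][b]
--
--     @cache
--     def dp(x, y):
--         res = value[x][y]
--         for i in range(1, x // 2 + 1):
--             res = max(res, dp(i, y) + dp(x - i, y))
--         for j in range(1, y // 2 + 1):
--             res = max(res, dp(x, j) + dp(x, y - j))
--
--         return res
--
--     return dp(m, n)
-- ===== SOURCE B (Python) =====
-- def sellingWood(m, n, prices):
--     value = [[0] * (n + 1) for _ in range(m + 1)]
--     for x, y, p in prices:
--         if 1 <= x <= m and 1 <= y <= n:
--             value[x][y] = p
--     dp = [[0] * (n + 1) for _ in range(m + 1)]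
--     for x in range(m + 1):
--         for y in range(n + 1):
--             best = value[x][y]
--             for i in range(1, x // 2 + 1):
--                 best = max(best, dp[i][y] + dp[x - i][y])
--             for j in range(1, y // 2 + 1):
--                 best = max(best, dp[x][j] + dp[x][y - j])
--             dp[x][y] = best
--     return dp[m][n]
-- ===== Notes on version B (the rewrite author's own statement) =====
-- stated objective: alternative
-- what changed: Replaces A's @cache top-down recursion (and its roundabout nearest-key downward scan used to populate the value table) with a direct guarded fill of value[x][y] from the price list and an explicit bottom-up tabulation dp[x][y] of the same recurrence in ascending x, y order.
import Mathlib
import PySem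

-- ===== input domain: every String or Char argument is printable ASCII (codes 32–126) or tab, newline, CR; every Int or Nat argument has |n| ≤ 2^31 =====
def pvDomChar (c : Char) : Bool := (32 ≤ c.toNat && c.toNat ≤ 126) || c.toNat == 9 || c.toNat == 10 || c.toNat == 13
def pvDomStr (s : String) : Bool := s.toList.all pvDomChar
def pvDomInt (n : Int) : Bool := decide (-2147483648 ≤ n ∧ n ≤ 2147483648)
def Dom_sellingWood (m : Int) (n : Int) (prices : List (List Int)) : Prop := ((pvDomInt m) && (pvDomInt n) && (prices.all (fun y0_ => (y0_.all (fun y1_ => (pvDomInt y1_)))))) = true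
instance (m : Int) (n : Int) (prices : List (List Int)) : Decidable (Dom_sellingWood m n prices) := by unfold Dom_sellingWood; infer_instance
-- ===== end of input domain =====

-- B replaces A's @cache top-down recursion (and A's roundabout nearest-key scan used to
-- fill the value table) by a direct fill of value[x][y] from the price list and an
-- explicit bottom-up tabulation of the same recurrence; equivalence of return values is proved.

-- ===== PORT A =====
-- shared matrix primitives (value[i][j] read / write on a list of lists)
def pvGetM (M : List (List Int)) (i j : Nat) : Int := (M.getD i []).getD j 0
def pvSetM (M : List (List Int)) (i j : Nat) (v : Int) : List (List Int) :=
  M.set i ((M.getD i []).set j v)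
def pvZeros (m n : Nat) : List (List Int) :=
  List.replicate (m + 1) (List.replicate (n + 1) 0)

-- price2 = defaultdict(dict); for x, y, p in prices: price2[x][y] = p
-- (rows not of length 3 raise ValueError in Python and are excluded by Pre_; skipped here)
def pvBuildP2 (prices : List (List Int)) : PySem.Dict Int (PySem.Dict Int Int) :=
  prices.foldl
    (fun d row =>
      match row with
      | [x, y, p] => d.insert x ((d.getD x PySem.Dict.empty).insert y p)
      | _ => d)
    PySem.Dict.empty

-- while a > 0 and a not in d: a -= 1
def pvSearch {ν : Type} (d : PySem.Dict Int ν) : Nat → Nat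
  | 0 => 0
  | (k + 1) => if d.contains ((k : Int) + 1) then k + 1 else pvSearch d k

-- body of A's value-filling double loop at (i, j)
def pvFillStep (p2 : PySem.Dict Int (PySem.Dict Int Int)) (M : List (List Int))
    (i j : Nat) : List (List Int) :=
  let a := pvSearch p2 i
  if a = 0 then M
  else
    let inner := p2.getD (a : Int) PySem.Dict.empty
    let b := pvSearch inner j
    if b = 0 then M
    else pvSetM M a b (inner.getD (b : Int) 0)

def pvFillA (p2 : PySem.Dict Int (PySem.Dict Int Int)) (m n : Nat) : List (List Int) :=
  (List.range (m + 1)).foldl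
    (fun M i => (List.range (n + 1)).foldl (fun M j => pvFillStep p2 M i j) M)
    (pvZeros m n)

-- @cache def dp(x, y): …  (functools.cache ported as an explicitly threaded memo dict)
def pvDpM (V : List (List Int)) : Nat → Nat → PySem.Dict (Nat × Nat) Int →
    Int × PySem.Dict (Nat × Nat) Int
  | x, y, memo =>
    match memo.get? (x, y) with
    | some v => (v, memo)
    | none =>
      let base := pvGetM V x y
      let s1 := (List.range' 1 (x / 2)).attach.foldl
        (fun s i =>
          let r1 := pvDpM V i.1 y s.2
          let r2 := pvDpM V (x - i.1) y r1.2
          (max s.1 (r1.1 + r2.1), r2.2)) (base, memo)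
      let s2 := (List.range' 1 (y / 2)).attach.foldl
        (fun s j =>
          let r1 := pvDpM V x j.1 s.2
          let r2 := pvDpM V x (y - j.1) r1.2
          (max s.1 (r1.1 + r2.1), r2.2)) s1
      (s2.1, s2.2.insert (x, y) s2.1)
termination_by x y _ => x + y
decreasing_by
  · have := i.2; simp [List.mem_range'_1] at this; omega
  · have := i.2; simp [List.mem_range'_1] at this; omega
  · have := j.2; simp [List.mem_range'_1] at this; omega
  · have := j.2; simp [List.mem_range'_1] at this; omega

def sellingWood (m : Int) (n : Int) (prices : List (List Int)) : Int :=
  let mN := m.toNat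
  let nN := n.toNat
  let p2 := pvBuildP2 prices
  let V := pvFillA p2 mN nN
  (pvDpM V mN nN PySem.Dict.empty).1

-- ===== PORT B =====
-- for x, y, p in prices: if 1 <= x <= m and 1 <= y <= n: value[x][y] = p
def pvFillB (m n : Nat) (prices : List (List Int)) : List (List Int) :=
  prices.foldl
    (fun M row =>
      match row with
      | [x, y, p] =>
          if 1 ≤ x ∧ x ≤ (m : Int) ∧ 1 ≤ y ∧ y ≤ (n : Int) then
            pvSetM M x.toNat y.toNat p
          else M
      | _ => M)
    (pvZeros m n)

-- inner body: best over the two split loops, starting from value[x][y]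
def pvDpStep (dp : List (List Int)) (x y : Nat) (base : Int) : Int :=
  let r1 := (List.range' 1 (x / 2)).foldl
    (fun res i => max res (pvGetM dp i y + pvGetM dp (x - i) y)) base
  (List.range' 1 (y / 2)).foldl
    (fun res j => max res (pvGetM dp x j + pvGetM dp x (y - j))) r1

def pvDpTab (V : List (List Int)) (m n : Nat) : List (List Int) :=
  (List.range (m + 1)).foldl
    (fun dp x =>
      (List.range (n + 1)).foldl
        (fun dp y => pvSetM dp x y (pvDpStep dp x y (pvGetM V x y))) dp)
    (pvZeros m n)

def sellingWood_alt (m : Int) (n : Int) (prices : List (List Int)) : Int :=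
  let mN := m.toNat
  let nN := n.toNat
  let V := pvFillB mN nN prices
  pvGetM (pvDpTab V mN nN) mN nN

-- ===== PRECONDITION & SPEC =====
-- Pre_ excludes negative m or n (Python A hits an IndexError on dp(m, n) there) and
-- price rows not of length 3 (the unpacking 'for x, y, p in prices' raises ValueError).
def Pre_sellingWood (m : Int) (n : Int) (prices : List (List Int)) : Prop :=
  0 ≤ m ∧ 0 ≤ n ∧ ∀ row ∈ prices, row.length = 3
instance (m : Int) (n : Int) (prices : List (List Int)) : Decidable (Pre_sellingWood m n prices) := by
  unfold Pre_sellingWood; infer_instance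

def pvWitness_sellingWood : Int × Int × List (List Int) := (3, 4, [[1, 2, 3], [2, 1, 4], [1, 2, 5]])

def Spec_sellingWood (m : Int) (n : Int) (prices : List (List Int)) (out : Int) : Prop := out = sellingWood_alt m n prices
instance (m : Int) (n : Int) (prices : List (List Int)) (out : Int) : Decidable (Spec_sellingWood m n prices out) := by unfold Spec_sellingWood; infer_instance

-- ===== CLAIM (what is proved, stated in full; the proofs are below) =====
def Claim_equal_sellingWood : Prop := ∀ (m : Int) (n : Int) (prices : List (List Int)), Dom_sellingWood m n prices → Pre_sellingWood m n prices → Spec_sellingWood m n prices (sellingWood m n prices)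


-- ===== LEMMAS AND PROOFS =====

-- proof helper: the memo-free recurrence (the mathematical dp both ports compute)
def pvDp (V : List (List Int)) : Nat → Nat → Int
  | x, y =>
    let base := pvGetM V x y
    let r1 := (List.range' 1 (x / 2)).attach.foldl
      (fun res i => max res (pvDp V i.1 y + pvDp V (x - i.1) y)) base
    (List.range' 1 (y / 2)).attach.foldl
      (fun res j => max res (pvDp V x j.1 + pvDp V x (y - j.1))) r1
termination_by x y => x + y
decreasing_by
  · have := i.2; simp [List.mem_range'_1] at this; omega
  · have := i.2; simp [List.mem_range'_1] at this; omega
  · have := j.2; simp [List.mem_range'_1] at this; omega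
  · have := j.2; simp [List.mem_range'_1] at this; omega


-- well-formedness: (m+1) rows of length (n+1)
def pvWf (m n : Nat) (M : List (List Int)) : Prop :=
  M.length = m + 1 ∧ ∀ row ∈ M, row.length = n + 1

theorem pvWf_zeros (m n : Nat) : pvWf m n (pvZeros m n) := by
  constructor
  · simp [pvZeros]
  · intro row hrow
    simp [pvZeros] at hrow
    simp [hrow]

theorem pvRow_len {m n : Nat} {M : List (List Int)} (h : pvWf m n M) {i : Nat} (hi : i ≤ m) :
    (M.getD i []).length = n + 1 := by
  have hlen := h.1
  have hlt : i < M.length := by omega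
  rw [List.getD_eq_getElem?_getD, List.getElem?_eq_getElem hlt]
  exact h.2 _ (List.getElem_mem hlt)

theorem pvWf_set {m n : Nat} {M : List (List Int)} (h : pvWf m n M) {i : Nat} (hi : i ≤ m)
    (j : Nat) (v : Int) : pvWf m n (pvSetM M i j v) := by
  constructor
  · simp [pvSetM, h.1]
  · intro row hrow
    rcases List.mem_or_eq_of_mem_set hrow with hmem | heq
    · exact h.2 _ hmem
    · subst heq
      rw [List.length_set]
      exact pvRow_len h hi

theorem pvGetM_set {m n : Nat} {M : List (List Int)} (h : pvWf m n M) {i j : Nat}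
    (hi : i ≤ m) (hj : j ≤ n) (v : Int) (a b : Nat) :
    pvGetM (pvSetM M i j v) a b = if a = i ∧ b = j then v else pvGetM M a b := by
  have hlen := h.1
  have hlt : i < M.length := by omega
  have hrl : (M.getD i []).length = n + 1 := pvRow_len h hi
  by_cases hai : a = i
  · subst hai
    have hrow : (pvSetM M a j v).getD a [] = (M.getD a []).set j v := by
      rw [List.getD_eq_getElem?_getD, pvSetM, List.getElem?_set_self hlt]
      simp
    by_cases hbj : b = j
    · subst hbj
      simp only [pvGetM, hrow, and_self, if_true]
      rw [List.getD_eq_getElem?_getD, List.getElem?_set_self (by omega)]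
      simp
    · simp only [pvGetM, hrow]
      rw [if_neg (by tauto)]
      rw [List.getD_eq_getElem?_getD, List.getElem?_set_ne (by omega), ← List.getD_eq_getElem?_getD]
  · have hrow : (pvSetM M i j v).getD a [] = M.getD a [] := by
      rw [List.getD_eq_getElem?_getD, pvSetM, List.getElem?_set_ne (by omega), ← List.getD_eq_getElem?_getD]
    simp only [pvGetM, hrow]
    rw [if_neg (by tauto)]

theorem pvGetM_zeros (m n a b : Nat) : pvGetM (pvZeros m n) a b = 0 := by
  simp only [pvGetM, pvZeros, List.getD_eq_getElem?_getD, List.getElem?_replicate]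
  split <;> simp

-- the last price entry matching (a, b) (later entries overwrite earlier ones)
def pvRowMatch (a b : Int) (row : List Int) : Option Int :=
  match row with
  | [x, y, p] => if x = a ∧ y = b then some p else none
  | _ => none

def pvLast (a b : Int) : List (List Int) → Option Int
  | [] => none
  | row :: rest => (pvLast a b rest).orElse (fun _ => pvRowMatch a b row)

def pvP2get (d : PySem.Dict Int (PySem.Dict Int Int)) (a b : Int) : Option Int :=
  (d.get? a).bind (fun inner => inner.get? b)

theorem pvP2get_foldl (prices : List (List Int)) (d : PySem.Dict Int (PySem.Dict Int Int))
    (a b : Int) :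
    pvP2get (prices.foldl
      (fun d row =>
        match row with
        | [x, y, p] => d.insert x ((d.getD x PySem.Dict.empty).insert y p)
        | _ => d) d) a b
    = (pvLast a b prices).orElse (fun _ => pvP2get d a b) := by
  induction prices generalizing d with
  | nil => simp [pvLast, Option.orElse]
  | cons row rest ih =>
    rw [List.foldl_cons, ih]
    have hstep : pvP2get (match row with
        | [x, y, p] => d.insert x ((d.getD x PySem.Dict.empty).insert y p)
        | _ => d) a b
      = (pvRowMatch a b row).orElse (fun _ => pvP2get d a b) := by
      unfold pvRowMatch
      match row with
      | [] => simp [Option.orElse]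
      | [x] => simp [Option.orElse]
      | [x, y] => simp [Option.orElse]
      | (x :: y :: p :: q :: rest') => simp [Option.orElse]
      | [x, y, p] =>
        simp only [pvP2get, PySem.Dict.get?_insert]
        by_cases hax : a = x
        · subst hax
          rw [if_pos rfl, Option.bind_some, PySem.Dict.get?_insert]
          by_cases hby : b = y
          · subst hby
            rw [if_pos rfl, if_pos ⟨rfl, rfl⟩]
            simp [Option.orElse]
          · rw [if_neg hby, if_neg (fun hh => hby hh.2.symm)]
            rw [PySem.Dict.getD_eq_get?_getD]
            cases hda : d.get? a <;> simp [Option.orElse, PySem.Dict.get?_empty]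
        · rw [if_neg hax, if_neg (fun hh => hax hh.1.symm)]
          simp [Option.orElse]
    simp only [hstep]
    rw [pvLast]
    cases pvLast a b rest <;> cases pvRowMatch a b row <;> simp [Option.orElse]

-- search characterisation
theorem pvSearch_spec {v : Type} (d : PySem.Dict Int v) (i : Nat) :
    pvSearch d i = 0 ∨
      (1 ≤ pvSearch d i ∧ pvSearch d i ≤ i ∧ d.contains ((pvSearch d i : Nat) : Int) = true) := by
  induction i with
  | zero => left; simp [pvSearch]
  | succ k ih =>
    by_cases h : d.contains ((k : Int) + 1) = true
    · right
      simp only [pvSearch, h, if_pos]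
      refine ⟨by omega, le_refl _, ?_⟩
      push_cast
      exact h
    · simp only [pvSearch, h, if_false, Bool.false_eq_true]
      rcases ih with h0 | ⟨h1, h2, h3⟩
      · left; exact h0
      · right; exact ⟨h1, by omega, h3⟩

theorem pvSearch_self {v : Type} (d : PySem.Dict Int v) (i : Nat) (h1 : 1 ≤ i)
    (h : d.contains ((i : Nat) : Int) = true) : pvSearch d i = i := by
  cases i with
  | zero => omega
  | succ k =>
    have h' : d.contains ((k : Int) + 1) = true := by push_cast at h; exact_mod_cast h
    simp [pvSearch, h']

-- price lookup at Nat coordinates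
def pvPA (p2 : PySem.Dict Int (PySem.Dict Int Int)) (a b : Nat) : Option Int :=
  pvP2get p2 (a : Int) (b : Int)

-- A-side fill invariant: cells in the already-processed region that carry a price are set
abbrev pvCondA (m n : Nat) (p2 : PySem.Dict Int (PySem.Dict Int Int)) (i0 j0 a b : Nat) : Prop :=
  1 ≤ a ∧ a ≤ m ∧ 1 ≤ b ∧ b ≤ n ∧ (pvPA p2 a b).isSome = true ∧ (a < i0 ∨ (a = i0 ∧ b < j0))

def pvInvA (m n : Nat) (p2 : PySem.Dict Int (PySem.Dict Int Int)) (i0 j0 : Nat)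
    (M : List (List Int)) : Prop :=
  ∀ a b, pvGetM M a b = if pvCondA m n p2 i0 j0 a b then (pvPA p2 a b).getD 0 else 0

theorem pvSelfKey {p2 : PySem.Dict Int (PySem.Dict Int Int)} {i0 j0 : Nat}
    (h1 : 1 ≤ i0) (hb1 : 1 ≤ j0) (hs : (pvPA p2 i0 j0).isSome = true) :
    pvSearch p2 i0 = i0 ∧
      pvSearch (p2.getD (i0 : Int) PySem.Dict.empty) j0 = j0 := by
  obtain ⟨inner, hinner⟩ : ∃ inner, p2.get? (i0 : Int) = some inner := by
    unfold pvPA pvP2get at hs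
    cases hp : p2.get? (i0 : Int) with
    | none => rw [hp] at hs; simp at hs
    | some inner => exact ⟨inner, rfl⟩
  have hc : p2.contains ((i0 : Nat) : Int) = true := by
    rw [PySem.Dict.contains_eq_isSome_get?, hinner]; rfl
  have hgd : p2.getD (i0 : Int) PySem.Dict.empty = inner := by
    rw [PySem.Dict.getD_eq_get?_getD, hinner]; rfl
  have hs2 : (inner.get? (j0 : Int)).isSome = true := by
    unfold pvPA pvP2get at hs
    rw [hinner] at hs
    simpa using hs
  have hc2 : inner.contains ((j0 : Nat) : Int) = true := by
    rw [PySem.Dict.contains_eq_isSome_get?]; exact hs2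
  refine ⟨pvSearch_self p2 i0 h1 hc, ?_⟩
  rw [hgd]
  exact pvSearch_self inner j0 hb1 hc2

theorem pvStepA (p2 : PySem.Dict Int (PySem.Dict Int Int)) (m n i0 j0 : Nat)
    (M : List (List Int)) (hi : i0 ≤ m) (hj : j0 ≤ n) (hwf : pvWf m n M)
    (hInv : pvInvA m n p2 i0 j0 M) :
    pvWf m n (pvFillStep p2 M i0 j0) ∧ pvInvA m n p2 i0 (j0 + 1) (pvFillStep p2 M i0 j0) := by
  simp only [pvFillStep]
  rcases pvSearch_spec p2 i0 with h0 | ⟨ha1, ha2, ha3⟩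
  · rw [h0, if_pos rfl]
    refine ⟨hwf, ?_⟩
    intro a b
    rw [hInv a b]
    apply if_congr _ rfl rfl
    unfold pvCondA
    constructor
    · rintro ⟨h1, h2, h3, h4, h5, h6⟩; exact ⟨h1, h2, h3, h4, h5, by omega⟩
    · rintro ⟨h1, h2, h3, h4, h5, h6⟩
      refine ⟨h1, h2, h3, h4, h5, ?_⟩
      by_cases hreg : a < i0 ∨ (a = i0 ∧ b < j0)
      · exact hreg
      · exfalso
        have hab : a = i0 ∧ b = j0 := by omega
        have hkey := (pvSelfKey (p2 := p2) (i0 := i0) (j0 := j0) (by omega) (by omega)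
          (by rw [← hab.1, ← hab.2]; exact h5)).1
        omega
  · rw [if_neg (by omega)]
    rcases pvSearch_spec (p2.getD ((pvSearch p2 i0 : Nat) : Int) PySem.Dict.empty) j0 with
      hb0 | ⟨hb1, hb2, hb3⟩
    · rw [hb0, if_pos rfl]
      refine ⟨hwf, ?_⟩
      intro a b
      rw [hInv a b]
      apply if_congr _ rfl rfl
      unfold pvCondA
      constructor
      · rintro ⟨h1, h2, h3, h4, h5, h6⟩; exact ⟨h1, h2, h3, h4, h5, by omega⟩
      · rintro ⟨h1, h2, h3, h4, h5, h6⟩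
        refine ⟨h1, h2, h3, h4, h5, ?_⟩
        by_cases hreg : a < i0 ∨ (a = i0 ∧ b < j0)
        · exact hreg
        · exfalso
          have hab : a = i0 ∧ b = j0 := by omega
          have hkey := pvSelfKey (p2 := p2) (i0 := i0) (j0 := j0) (by omega) (by omega)
            (by rw [← hab.1, ← hab.2]; exact h5)
          rw [hkey.1] at hb0
          rw [hkey.2] at hb0
          omega
    · rw [if_neg (by omega)]
      set a0 := pvSearch p2 i0 with ha0def
      set b0 := pvSearch (p2.getD ((a0 : Nat) : Int) PySem.Dict.empty) j0 with hb0def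
      obtain ⟨inner, hinner⟩ : ∃ inner, p2.get? ((a0 : Nat) : Int) = some inner := by
        rw [PySem.Dict.contains_eq_isSome_get?] at ha3
        cases hp : p2.get? ((a0 : Nat) : Int) with
        | none => rw [hp] at ha3; simp at ha3
        | some inner => exact ⟨inner, rfl⟩
      have hgd : p2.getD ((a0 : Nat) : Int) PySem.Dict.empty = inner := by
        rw [PySem.Dict.getD_eq_get?_getD, hinner]; rfl
      have hbsome : (inner.get? ((b0 : Nat) : Int)).isSome = true := by
        rw [← PySem.Dict.contains_eq_isSome_get?]
        rw [hgd] at hb3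
        exact hb3
      have hval : pvPA p2 a0 b0 = inner.get? ((b0 : Nat) : Int) := by
        unfold pvPA pvP2get
        rw [hinner]
        rfl
      refine ⟨pvWf_set hwf (by omega) _ _, ?_⟩
      intro a b
      rw [pvGetM_set hwf (by omega) (by omega)]
      by_cases hab : a = a0 ∧ b = b0
      · rw [if_pos hab, hab.1, hab.2]
        rw [if_pos ?side]
        case side =>
          refine ⟨by omega, by omega, by omega, by omega, ?_, by omega⟩
          rw [hval]; exact hbsome
        rw [hval, hgd, PySem.Dict.getD_eq_get?_getD]
      · rw [if_neg hab, hInv a b]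
        apply if_congr _ rfl rfl
        unfold pvCondA
        constructor
        · rintro ⟨h1, h2, h3, h4, h5, h6⟩; exact ⟨h1, h2, h3, h4, h5, by omega⟩
        · rintro ⟨h1, h2, h3, h4, h5, h6⟩
          refine ⟨h1, h2, h3, h4, h5, ?_⟩
          by_cases hreg : a < i0 ∨ (a = i0 ∧ b < j0)
          · exact hreg
          · exfalso
            have hab' : a = i0 ∧ b = j0 := by omega
            have hkey := pvSelfKey (p2 := p2) (i0 := i0) (j0 := j0) (by omega) (by omega)
              (by rw [← hab'.1, ← hab'.2]; exact h5)
            apply hab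
            constructor
            · omega
            · rw [hb0def]
              have : a0 = i0 := by omega
              rw [this, hkey.2]
              omega

theorem pvLoopInnerA (p2 : PySem.Dict Int (PySem.Dict Int Int)) (m n i0 : Nat) (hi : i0 ≤ m) :
    ∀ (k j0 : Nat) (M : List (List Int)), j0 + k ≤ n + 1 → pvWf m n M → pvInvA m n p2 i0 j0 M →
      pvWf m n ((List.range' j0 k).foldl (fun M j => pvFillStep p2 M i0 j) M) ∧
      pvInvA m n p2 i0 (j0 + k) ((List.range' j0 k).foldl (fun M j => pvFillStep p2 M i0 j) M) := by
  intro k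
  induction k with
  | zero => intro j0 M _ hwf hInv; simpa using ⟨hwf, hInv⟩
  | succ k ih =>
    intro j0 M hle hwf hInv
    rw [List.range'_succ, List.foldl_cons]
    obtain ⟨hwf', hInv'⟩ := pvStepA p2 m n i0 j0 M hi (by omega) hwf hInv
    obtain ⟨hwf'', hInv''⟩ := ih (j0 + 1) _ (by omega) hwf' hInv'
    have : j0 + 1 + k = j0 + (k + 1) := by omega
    rw [this] at hInv''
    exact ⟨hwf'', hInv''⟩

theorem pvInvA_row_end {m n : Nat} {p2 : PySem.Dict Int (PySem.Dict Int Int)} {i0 : Nat}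
    {M : List (List Int)} (hInv : pvInvA m n p2 i0 (n + 1) M) : pvInvA m n p2 (i0 + 1) 0 M := by
  intro a b
  rw [hInv a b]
  apply if_congr _ rfl rfl
  unfold pvCondA
  constructor
  · rintro ⟨h1, h2, h3, h4, h5, h6⟩; exact ⟨h1, h2, h3, h4, h5, by omega⟩
  · rintro ⟨h1, h2, h3, h4, h5, h6⟩; exact ⟨h1, h2, h3, h4, h5, by omega⟩

theorem pvLoopOuterA (p2 : PySem.Dict Int (PySem.Dict Int Int)) (m n : Nat) :
    ∀ (k i0 : Nat) (M : List (List Int)), i0 + k ≤ m + 1 → pvWf m n M → pvInvA m n p2 i0 0 M →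
      pvWf m n ((List.range' i0 k).foldl
        (fun M i => (List.range' 0 (n + 1)).foldl (fun M j => pvFillStep p2 M i j) M) M) ∧
      pvInvA m n p2 (i0 + k) 0 ((List.range' i0 k).foldl
        (fun M i => (List.range' 0 (n + 1)).foldl (fun M j => pvFillStep p2 M i j) M) M) := by
  intro k
  induction k with
  | zero => intro i0 M _ hwf hInv; simpa using ⟨hwf, hInv⟩
  | succ k ih =>
    intro i0 M hle hwf hInv
    rw [List.range'_succ (s := i0), List.foldl_cons]
    obtain ⟨hwf', hInv'⟩ := pvLoopInnerA p2 m n i0 (by omega) (n + 1) 0 M (by omega) hwf hInv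
    have hInv'' := pvInvA_row_end (by simpa using hInv')
    obtain ⟨h1, h2⟩ := ih (i0 + 1) _ (by omega) hwf' hInv''
    have heq : i0 + 1 + k = i0 + (k + 1) := by omega
    rw [heq] at h2
    exact ⟨h1, h2⟩

theorem pvGetM_fillA (p2 : PySem.Dict Int (PySem.Dict Int Int)) (m n a b : Nat) :
    pvGetM (pvFillA p2 m n) a b =
      if 1 ≤ a ∧ a ≤ m ∧ 1 ≤ b ∧ b ≤ n ∧ (pvPA p2 a b).isSome = true
      then (pvPA p2 a b).getD 0 else 0 := by
  have h0 : pvInvA m n p2 0 0 (pvZeros m n) := by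
    intro a b
    rw [pvGetM_zeros, if_neg]
    rintro ⟨_, _, _, _, _, h6⟩
    omega
  have h := (pvLoopOuterA p2 m n (m + 1) 0 (pvZeros m n) (by omega) (pvWf_zeros m n) h0).2
  have h' := h a b
  unfold pvFillA
  simp only [List.range_eq_range']
  rw [h']
  apply if_congr _ rfl rfl
  unfold pvCondA
  constructor
  · rintro ⟨h1, h2, h3, h4, h5, _⟩; exact ⟨h1, h2, h3, h4, h5⟩
  · rintro ⟨h1, h2, h3, h4, h5⟩; exact ⟨h1, h2, h3, h4, h5, by omega⟩

-- B-side fill: one row of prices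
theorem pvBStep (m n : Nat) (row : List Int) (M : List (List Int)) (hwf : pvWf m n M) :
    pvWf m n (match row with
      | [x, y, p] =>
          if 1 ≤ x ∧ x ≤ (m : Int) ∧ 1 ≤ y ∧ y ≤ (n : Int) then
            pvSetM M x.toNat y.toNat p
          else M
      | _ => M) ∧
    ∀ a b : Nat, pvGetM (match row with
      | [x, y, p] =>
          if 1 ≤ x ∧ x ≤ (m : Int) ∧ 1 ≤ y ∧ y ≤ (n : Int) then
            pvSetM M x.toNat y.toNat p
          else M
      | _ => M) a b =
      if 1 ≤ a ∧ a ≤ m ∧ 1 ≤ b ∧ b ≤ n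
      then (pvRowMatch (a : Int) (b : Int) row).getD (pvGetM M a b)
      else pvGetM M a b := by
  match row with
  | [] => exact ⟨hwf, by intro a b; simp [pvRowMatch]⟩
  | [x] => exact ⟨hwf, by intro a b; simp [pvRowMatch]⟩
  | [x, y] => exact ⟨hwf, by intro a b; simp [pvRowMatch]⟩
  | (x :: y :: p :: q :: rest') => exact ⟨hwf, by intro a b; simp [pvRowMatch]⟩
  | [x, y, p] =>
    dsimp only
    by_cases hg : 1 ≤ x ∧ x ≤ (m : Int) ∧ 1 ≤ y ∧ y ≤ (n : Int)
    · rw [if_pos hg]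
      have hxm : x.toNat ≤ m := by omega
      have hyn : y.toNat ≤ n := by omega
      refine ⟨pvWf_set hwf hxm _ _, ?_⟩
      intro a b
      rw [pvGetM_set hwf hxm hyn]
      by_cases hab : a = x.toNat ∧ b = y.toNat
      · rw [if_pos hab]
        have hxa : x = (a : Int) := by omega
        have hyb : y = (b : Int) := by omega
        rw [if_pos (by omega)]
        simp [pvRowMatch, hxa, hyb]
      · rw [if_neg hab]
        have hmatch : pvRowMatch (a : Int) (b : Int) [x, y, p] = none := by
          unfold pvRowMatch
          dsimp only
          rw [if_neg]
          rintro ⟨hxa, hyb⟩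
          exact hab ⟨by omega, by omega⟩
        rw [hmatch]
        split <;> rfl
    · rw [if_neg hg]
      refine ⟨hwf, ?_⟩
      intro a b
      by_cases hin : 1 ≤ a ∧ a ≤ m ∧ 1 ≤ b ∧ b ≤ n
      · rw [if_pos hin]
        have hmatch : pvRowMatch (a : Int) (b : Int) [x, y, p] = none := by
          unfold pvRowMatch
          dsimp only
          rw [if_neg]
          rintro ⟨hxa, hyb⟩
          exact hg ⟨by omega, by omega, by omega, by omega⟩
        rw [hmatch]
        rfl
      · rw [if_neg hin]

-- B-side fill characterisation
theorem pvGetM_fillB_go (m n : Nat) (prices : List (List Int)) :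
    ∀ (M : List (List Int)), pvWf m n M → ∀ a b : Nat,
      pvGetM (prices.foldl
        (fun M row =>
          match row with
          | [x, y, p] =>
              if 1 ≤ x ∧ x ≤ (m : Int) ∧ 1 ≤ y ∧ y ≤ (n : Int) then
                pvSetM M x.toNat y.toNat p
              else M
          | _ => M) M) a b =
      if 1 ≤ a ∧ a ≤ m ∧ 1 ≤ b ∧ b ≤ n
      then (pvLast (a : Int) (b : Int) prices).getD (pvGetM M a b)
      else pvGetM M a b := by
  induction prices with
  | nil => intro M _ a b; simp [pvLast]
  | cons row rest ih =>
    intro M hwf a b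
    rw [List.foldl_cons]
    obtain ⟨hwf', hpt⟩ := pvBStep m n row M hwf
    rw [ih _ hwf', hpt a b, pvLast]
    by_cases hin : 1 ≤ a ∧ a ≤ m ∧ 1 ≤ b ∧ b ≤ n
    · simp only [if_pos hin]
      cases pvLast (a : Int) (b : Int) rest <;>
        cases pvRowMatch (a : Int) (b : Int) row <;> simp [Option.orElse]
    · simp only [if_neg hin]

theorem pvGetM_fillB (m n : Nat) (prices : List (List Int)) (a b : Nat) :
    pvGetM (pvFillB m n prices) a b =
      if 1 ≤ a ∧ a ≤ m ∧ 1 ≤ b ∧ b ≤ n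
      then (pvLast (a : Int) (b : Int) prices).getD 0 else 0 := by
  unfold pvFillB
  rw [pvGetM_fillB_go m n prices (pvZeros m n) (pvWf_zeros m n) a b, pvGetM_zeros]

theorem pvWf_fillA (p2 : PySem.Dict Int (PySem.Dict Int Int)) (m n : Nat) :
    pvWf m n (pvFillA p2 m n) := by
  have h0 : pvInvA m n p2 0 0 (pvZeros m n) := by
    intro a b
    rw [pvGetM_zeros, if_neg]
    rintro ⟨_, _, _, _, _, h6⟩
    omega
  have h := (pvLoopOuterA p2 m n (m + 1) 0 (pvZeros m n) (by omega) (pvWf_zeros m n) h0).1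
  unfold pvFillA
  simpa only [List.range_eq_range'] using h

theorem pvWf_fillB (m n : Nat) (prices : List (List Int)) : pvWf m n (pvFillB m n prices) := by
  unfold pvFillB
  have : ∀ (l : List (List Int)) (M : List (List Int)), pvWf m n M →
      pvWf m n (l.foldl (fun M row =>
        match row with
        | [x, y, p] =>
            if 1 ≤ x ∧ x ≤ (m : Int) ∧ 1 ≤ y ∧ y ≤ (n : Int) then
              pvSetM M x.toNat y.toNat p
            else M
        | _ => M) M) := by
    intro l
    induction l with
    | nil => intro M hwf; exact hwf
    | cons row rest ih =>
      intro M hwf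
      rw [List.foldl_cons]
      exact ih _ (pvBStep m n row M hwf).1
  exact this prices (pvZeros m n) (pvWf_zeros m n)

theorem pvGetM_eq_getElem {M : List (List Int)} {i j : Nat} (h1 : i < M.length)
    (h2 : j < M[i].length) : M[i][j] = pvGetM M i j := by
  simp [pvGetM, List.getD_eq_getElem?_getD, h1, h2]

-- the two value matrices are the same list of lists
theorem pvValue_eq (m n : Nat) (prices : List (List Int)) :
    pvFillA (pvBuildP2 prices) m n = pvFillB m n prices := by
  have hwa := pvWf_fillA (pvBuildP2 prices) m n
  have hwb := pvWf_fillB m n prices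
  have hP : ∀ a b : Nat, pvPA (pvBuildP2 prices) a b = pvLast (a : Int) (b : Int) prices := by
    intro a b
    unfold pvPA pvBuildP2
    rw [pvP2get_foldl]
    have : pvP2get PySem.Dict.empty (a : Int) (b : Int) = none := by
      simp [pvP2get, PySem.Dict.get?_empty]
    rw [this]
    cases pvLast (a : Int) (b : Int) prices <;> simp [Option.orElse]
  have hpt : ∀ a b : Nat, pvGetM (pvFillA (pvBuildP2 prices) m n) a b
      = pvGetM (pvFillB m n prices) a b := by
    intro a b
    rw [pvGetM_fillA, pvGetM_fillB, hP]
    cases hL : pvLast (a : Int) (b : Int) prices <;> split_ifs <;> simp_all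
  -- pointwise pvGetM equality + equal shape ⇒ list equality
  apply List.ext_getElem (by rw [hwa.1, hwb.1])
  intro i h1 h2
  apply List.ext_getElem
  · have := hwa.2 _ (List.getElem_mem h1)
    have := hwb.2 _ (List.getElem_mem h2)
    omega
  · intro j hj1 hj2
    rw [pvGetM_eq_getElem h1 hj1, pvGetM_eq_getElem h2 hj2, hpt]

theorem pvFoldl_attach {α β : Type} (l : List α) (f : β → α → β) (init : β) :
    l.attach.foldl (fun acc t => f acc t.1) init = l.foldl f init := by
  induction l generalizing init with
  | nil => rfl
  | cons a l ih =>
    simp only [List.attach_cons, List.foldl_cons, List.foldl_map]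
    exact ih (f init a)

-- tabulation invariant: table agrees with the recursion on the processed region
def pvInvT (V : List (List Int)) (m n i0 j0 : Nat) (dp : List (List Int)) : Prop :=
  ∀ x y, x ≤ m → y ≤ n → (x < i0 ∨ (x = i0 ∧ y < j0)) → pvGetM dp x y = pvDp V x y

theorem pvDpStep_eq (V : List (List Int)) (m n i0 j0 : Nat) (dp : List (List Int))
    (hi : i0 ≤ m) (hj : j0 ≤ n) (hInv : pvInvT V m n i0 j0 dp) :
    pvDpStep dp i0 j0 (pvGetM V i0 j0) = pvDp V i0 j0 := by
  conv_rhs => rw [pvDp]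
  simp only [pvDpStep]
  have ha1 := pvFoldl_attach (List.range' 1 (i0 / 2))
    (fun res i => max res (pvDp V i j0 + pvDp V (i0 - i) j0)) (pvGetM V i0 j0)
  rw [ha1]
  have ha2 := pvFoldl_attach (List.range' 1 (j0 / 2))
    (fun res j => max res (pvDp V i0 j + pvDp V i0 (j0 - j)))
    ((List.range' 1 (i0 / 2)).foldl
      (fun res i => max res (pvDp V i j0 + pvDp V (i0 - i) j0)) (pvGetM V i0 j0))
  rw [ha2]
  have h1 : (List.range' 1 (i0 / 2)).foldl
      (fun res i => max res (pvGetM dp i j0 + pvGetM dp (i0 - i) j0)) (pvGetM V i0 j0)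
    = (List.range' 1 (i0 / 2)).foldl
      (fun res i => max res (pvDp V i j0 + pvDp V (i0 - i) j0)) (pvGetM V i0 j0) := by
    apply PySem.List.foldl_congr_mem
    intro acc i hi'
    rw [List.mem_range'_1] at hi'
    rw [hInv i j0 (by omega) (by omega) (by omega),
        hInv (i0 - i) j0 (by omega) (by omega) (by omega)]
  rw [h1]
  apply PySem.List.foldl_congr_mem
  intro acc j hj'
  rw [List.mem_range'_1] at hj'
  rw [hInv i0 j (by omega) (by omega) (by omega),
      hInv i0 (j0 - j) (by omega) (by omega) (by omega)]

theorem pvStepT (V : List (List Int)) (m n i0 j0 : Nat) (dp : List (List Int))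
    (hi : i0 ≤ m) (hj : j0 ≤ n) (hwf : pvWf m n dp) (hInv : pvInvT V m n i0 j0 dp) :
    pvWf m n (pvSetM dp i0 j0 (pvDpStep dp i0 j0 (pvGetM V i0 j0))) ∧
    pvInvT V m n i0 (j0 + 1) (pvSetM dp i0 j0 (pvDpStep dp i0 j0 (pvGetM V i0 j0))) := by
  refine ⟨pvWf_set hwf hi _ _, ?_⟩
  intro x y hx hy hreg
  rw [pvGetM_set hwf hi hj]
  by_cases hxy : x = i0 ∧ y = j0
  · rw [if_pos hxy, hxy.1, hxy.2]
    exact pvDpStep_eq V m n i0 j0 dp hi hj hInv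
  · rw [if_neg hxy]
    exact hInv x y hx hy (by omega)

theorem pvLoopInnerT (V : List (List Int)) (m n i0 : Nat) (hi : i0 ≤ m) :
    ∀ (k j0 : Nat) (dp : List (List Int)), j0 + k ≤ n + 1 → pvWf m n dp → pvInvT V m n i0 j0 dp →
      pvWf m n ((List.range' j0 k).foldl
        (fun dp y => pvSetM dp i0 y (pvDpStep dp i0 y (pvGetM V i0 y))) dp) ∧
      pvInvT V m n i0 (j0 + k) ((List.range' j0 k).foldl
        (fun dp y => pvSetM dp i0 y (pvDpStep dp i0 y (pvGetM V i0 y))) dp) := by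
  intro k
  induction k with
  | zero => intro j0 dp _ hwf hInv; simpa using ⟨hwf, hInv⟩
  | succ k ih =>
    intro j0 dp hle hwf hInv
    rw [List.range'_succ, List.foldl_cons]
    obtain ⟨hwf', hInv'⟩ := pvStepT V m n i0 j0 dp hi (by omega) hwf hInv
    obtain ⟨hwf'', hInv''⟩ := ih (j0 + 1) _ (by omega) hwf' hInv'
    have : j0 + 1 + k = j0 + (k + 1) := by omega
    rw [this] at hInv''
    exact ⟨hwf'', hInv''⟩

theorem pvInvT_row_end {V : List (List Int)} {m n i0 : Nat} {dp : List (List Int)}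
    (hInv : pvInvT V m n i0 (n + 1) dp) : pvInvT V m n (i0 + 1) 0 dp := by
  intro x y hx hy hreg
  exact hInv x y hx hy (by omega)

theorem pvLoopOuterT (V : List (List Int)) (m n : Nat) :
    ∀ (k i0 : Nat) (dp : List (List Int)), i0 + k ≤ m + 1 → pvWf m n dp → pvInvT V m n i0 0 dp →
      pvWf m n ((List.range' i0 k).foldl
        (fun dp x => (List.range' 0 (n + 1)).foldl
          (fun dp y => pvSetM dp x y (pvDpStep dp x y (pvGetM V x y))) dp) dp) ∧
      pvInvT V m n (i0 + k) 0 ((List.range' i0 k).foldl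
        (fun dp x => (List.range' 0 (n + 1)).foldl
          (fun dp y => pvSetM dp x y (pvDpStep dp x y (pvGetM V x y))) dp) dp) := by
  intro k
  induction k with
  | zero => intro i0 dp _ hwf hInv; simpa using ⟨hwf, hInv⟩
  | succ k ih =>
    intro i0 dp hle hwf hInv
    rw [List.range'_succ (s := i0), List.foldl_cons]
    obtain ⟨hwf', hInv'⟩ := pvLoopInnerT V m n i0 (by omega) (n + 1) 0 dp (by omega) hwf hInv
    have hInv'' := pvInvT_row_end (by simpa using hInv')
    obtain ⟨h1, h2⟩ := ih (i0 + 1) _ (by omega) hwf' hInv''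
    have heq : i0 + 1 + k = i0 + (k + 1) := by omega
    rw [heq] at h2
    exact ⟨h1, h2⟩

theorem pvDpTab_eq (V : List (List Int)) (m n : Nat) :
    pvGetM (pvDpTab V m n) m n = pvDp V m n := by
  have h0 : pvInvT V m n 0 0 (pvZeros m n) := by
    intro x y _ _ hreg
    omega
  have h := (pvLoopOuterT V m n (m + 1) 0 (pvZeros m n) (by omega) (pvWf_zeros m n) h0).2
  unfold pvDpTab
  simp only [List.range_eq_range']
  exact h m n (le_refl m) (le_refl n) (by omega)


-- memoization correctness: pvDpM computes pvDp and keeps only correct cache entries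
def pvGood (V : List (List Int)) (memo : PySem.Dict (Nat × Nat) Int) : Prop :=
  ∀ x y v, memo.get? (x, y) = some v → v = pvDp V x y

theorem pvDpM_unfold_eq (V : List (List Int)) (x y : Nat)
    (memo : PySem.Dict (Nat × Nat) Int)
    (ihall : ∀ x' y' memo', x' + y' < x + y → pvGood V memo' →
      (pvDpM V x' y' memo').1 = pvDp V x' y' ∧ pvGood V (pvDpM V x' y' memo').2)
    (hG : pvGood V memo) :
    (pvDpM V x y memo).1 = pvDp V x y ∧ pvGood V (pvDpM V x y memo).2 := by
  rw [pvDpM]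
  cases hm : memo.get? (x, y) with
  | some v =>
    exact ⟨hG x y v hm, hG⟩
  | none =>
    have fold1 : ∀ (l : List Nat), (∀ i ∈ l, 1 ≤ i ∧ i ≤ x / 2) →
        ∀ (acc : Int) (memo' : PySem.Dict (Nat × Nat) Int), pvGood V memo' →
        (l.attach.foldl (fun s i =>
            let r1 := pvDpM V i.1 y s.2
            let r2 := pvDpM V (x - i.1) y r1.2
            (max s.1 (r1.1 + r2.1), r2.2)) (acc, memo')).1
          = l.foldl (fun res i => max res (pvDp V i y + pvDp V (x - i) y)) acc ∧
        pvGood V ((l.attach.foldl (fun s i =>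
            let r1 := pvDpM V i.1 y s.2
            let r2 := pvDpM V (x - i.1) y r1.2
            (max s.1 (r1.1 + r2.1), r2.2)) (acc, memo'))).2 := by
      intro l
      induction l with
      | nil => intro _ acc memo' hG'; exact ⟨rfl, hG'⟩
      | cons a l ih =>
        intro hmem acc memo' hG'
        have ha := hmem a List.mem_cons_self
        simp only [List.attach_cons, List.foldl_cons, List.foldl_map]
        obtain ⟨e1, g1⟩ := ihall a y memo' (by omega) hG'
        obtain ⟨e2, g2⟩ := ihall (x - a) y (pvDpM V a y memo').2 (by omega) g1
        rw [e1, e2]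
        exact ih (fun i hi => hmem i (List.mem_cons_of_mem a hi)) _ _ g2
    have fold2 : ∀ (l : List Nat), (∀ j ∈ l, 1 ≤ j ∧ j ≤ y / 2) →
        ∀ (acc : Int) (memo' : PySem.Dict (Nat × Nat) Int), pvGood V memo' →
        (l.attach.foldl (fun s j =>
            let r1 := pvDpM V x j.1 s.2
            let r2 := pvDpM V x (y - j.1) r1.2
            (max s.1 (r1.1 + r2.1), r2.2)) (acc, memo')).1
          = l.foldl (fun res j => max res (pvDp V x j + pvDp V x (y - j))) acc ∧
        pvGood V ((l.attach.foldl (fun s j =>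
            let r1 := pvDpM V x j.1 s.2
            let r2 := pvDpM V x (y - j.1) r1.2
            (max s.1 (r1.1 + r2.1), r2.2)) (acc, memo'))).2 := by
      intro l
      induction l with
      | nil => intro _ acc memo' hG'; exact ⟨rfl, hG'⟩
      | cons a l ih =>
        intro hmem acc memo' hG'
        have ha := hmem a List.mem_cons_self
        simp only [List.attach_cons, List.foldl_cons, List.foldl_map]
        obtain ⟨e1, g1⟩ := ihall x a memo' (by omega) hG'
        obtain ⟨e2, g2⟩ := ihall x (y - a) (pvDpM V x a memo').2 (by omega) g1
        rw [e1, e2]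
        exact ih (fun j hj => hmem j (List.mem_cons_of_mem a hj)) _ _ g2
    have hmem1 : ∀ i ∈ List.range' 1 (x / 2), 1 ≤ i ∧ i ≤ x / 2 := by
      intro i hi; rw [List.mem_range'_1] at hi; omega
    have hmem2 : ∀ j ∈ List.range' 1 (y / 2), 1 ≤ j ∧ j ≤ y / 2 := by
      intro j hj; rw [List.mem_range'_1] at hj; omega
    obtain ⟨e1, g1⟩ := fold1 (List.range' 1 (x / 2)) hmem1 (pvGetM V x y) memo hG
    obtain ⟨e2, g2⟩ := fold2 (List.range' 1 (y / 2)) hmem2 _ _ g1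
    -- value of the whole body
    have hs2 : ((List.range' 1 (y / 2)).attach.foldl (fun s j =>
          let r1 := pvDpM V x j.1 s.2
          let r2 := pvDpM V x (y - j.1) r1.2
          (max s.1 (r1.1 + r2.1), r2.2))
        ((List.range' 1 (x / 2)).attach.foldl (fun s i =>
          let r1 := pvDpM V i.1 y s.2
          let r2 := pvDpM V (x - i.1) y r1.2
          (max s.1 (r1.1 + r2.1), r2.2)) (pvGetM V x y, memo))).1
        = pvDp V x y := by
      have hst : ((List.range' 1 (x / 2)).attach.foldl (fun s i =>
          let r1 := pvDpM V i.1 y s.2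
          let r2 := pvDpM V (x - i.1) y r1.2
          (max s.1 (r1.1 + r2.1), r2.2)) (pvGetM V x y, memo))
        = (((List.range' 1 (x / 2)).attach.foldl (fun s i =>
          let r1 := pvDpM V i.1 y s.2
          let r2 := pvDpM V (x - i.1) y r1.2
          (max s.1 (r1.1 + r2.1), r2.2)) (pvGetM V x y, memo)).1,
          ((List.range' 1 (x / 2)).attach.foldl (fun s i =>
          let r1 := pvDpM V i.1 y s.2
          let r2 := pvDpM V (x - i.1) y r1.2
          (max s.1 (r1.1 + r2.1), r2.2)) (pvGetM V x y, memo)).2) := rfl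
      rw [hst, e1]
      have := fold2 (List.range' 1 (y / 2)) hmem2
        ((List.range' 1 (x / 2)).foldl
          (fun res i => max res (pvDp V i y + pvDp V (x - i) y)) (pvGetM V x y)) _ g1
      rw [this.1]
      conv_rhs => rw [pvDp]
      have hb1 := pvFoldl_attach (List.range' 1 (x / 2))
        (fun res i => max res (pvDp V i y + pvDp V (x - i) y)) (pvGetM V x y)
      have hb2 := pvFoldl_attach (List.range' 1 (y / 2))
        (fun res j => max res (pvDp V x j + pvDp V x (y - j)))
        ((List.range' 1 (x / 2)).foldl
          (fun res i => max res (pvDp V i y + pvDp V (x - i) y)) (pvGetM V x y))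
      rw [hb1, hb2]
    refine ⟨hs2, ?_⟩
    intro x' y' v hget
    rw [PySem.Dict.get?_insert] at hget
    by_cases hk : (x', y') = (x, y)
    · rw [if_pos hk] at hget
      have hx' : x' = x := (Prod.ext_iff.mp hk).1
      have hy' : y' = y := (Prod.ext_iff.mp hk).2
      rw [hx', hy', ← hs2]
      exact (Option.some.injEq _ _ ▸ hget).symm
    · rw [if_neg hk] at hget
      exact g2 x' y' v hget

theorem pvDpM_eq (V : List (List Int)) (x y : Nat) :
    (pvDpM V x y PySem.Dict.empty).1 = pvDp V x y := by
  have key : ∀ (N x y : Nat) (memo : PySem.Dict (Nat × Nat) Int), x + y ≤ N →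
      pvGood V memo →
      (pvDpM V x y memo).1 = pvDp V x y ∧ pvGood V (pvDpM V x y memo).2 := by
    intro N
    induction N with
    | zero =>
      intro x y memo hle hG
      exact pvDpM_unfold_eq V x y memo (fun x' y' memo' hlt _ => by omega) hG
    | succ N ih =>
      intro x y memo hle hG
      exact pvDpM_unfold_eq V x y memo
        (fun x' y' memo' hlt hG' => ih x' y' memo' (by omega) hG') hG
  have hGe : pvGood V PySem.Dict.empty := by
    intro x' y' v h
    rw [PySem.Dict.get?_empty] at h
    exact absurd h (by simp)
  exact (key (x + y) x y PySem.Dict.empty (le_refl _) hGe).1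

theorem pv_main : ∀ (m n : Int) (prices : List (List Int)),
    sellingWood m n prices = sellingWood_alt m n prices := by
  intro m n prices
  show (pvDpM (pvFillA (pvBuildP2 prices) m.toNat n.toNat) m.toNat n.toNat PySem.Dict.empty).1
      = pvGetM (pvDpTab (pvFillB m.toNat n.toNat prices) m.toNat n.toNat) m.toNat n.toNat
  rw [pvValue_eq, pvDpTab_eq, pvDpM_eq]

-- ===== VERDICT (by name: the statement is the Claim_ definition above) =====
theorem sellingWood_spec : Claim_equal_sellingWood := by
  intro m n prices _ _
  unfold Spec_sellingWood
  exact pv_main m n prices
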